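-- pv_equiv track=rewrite | github.com/AmanBotz/Num | pr.py | to_math_sans_plain
-- ===== SOURCE A (Python) =====
-- def to_math_sans_plain(text: str) -> str:
--     result = []
--     for ch in text:
--         if 'A' <= ch <= 'Z':
--             result.append(chr(ord(ch) - ord('A') + 0x1D5A0))
--         elif 'a' <= ch <= 'z':
--             result.append(chr(ord(ch) - ord('a') + 0x1D5BA))
--         elif '0' <= ch <= '9':
--             result.append(chr(ord(ch) - ord('0') + 0x1D7E2))
--         else:
--             result.append(ch)
--     return ''.join(result)
-- ===== SOURCE B (Python) =====
-- def to_math_sans_plain(text: str) -> str: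
--     table = {ord('A') + i: chr(0x1D5A0 + i) for i in range(26)}
--     table.update({ord('a') + i: chr(0x1D5BA + i) for i in range(26)})
--     table.update({ord('0') + i: chr(0x1D7E2 + i) for i in range(10)})
--     return text.translate(table)
-- ===== Notes on version B (the rewrite author's own statement) =====
-- stated objective: idiomatic
-- what changed: Replaces the per-character if/elif arithmetic chain with a translation table built once via dict comprehensions and a single str.translate call, moving the per-character work into the C-level translate loop.
import Mathlib
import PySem

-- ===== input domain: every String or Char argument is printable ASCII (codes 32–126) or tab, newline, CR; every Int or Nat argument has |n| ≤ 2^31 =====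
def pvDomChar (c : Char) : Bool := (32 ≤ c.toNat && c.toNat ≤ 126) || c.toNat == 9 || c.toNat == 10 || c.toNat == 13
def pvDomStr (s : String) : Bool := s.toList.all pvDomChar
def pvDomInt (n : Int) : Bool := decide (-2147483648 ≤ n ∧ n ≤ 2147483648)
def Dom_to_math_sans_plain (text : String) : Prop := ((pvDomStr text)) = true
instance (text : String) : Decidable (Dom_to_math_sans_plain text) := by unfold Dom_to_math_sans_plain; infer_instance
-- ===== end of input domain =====

-- B replaces A's per-character if/elif arithmetic chain with a translation table
-- built once (dict comprehensions over the three ranges) and one translate pass; idiomatic, same cost.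

-- ===== PORT A =====
-- literal transliteration: foldl over the characters appending to `result`, then ''.join
def to_math_sans_plain (text : String) : String :=
  String.mk (text.toList.foldl (fun result ch =>
    if 'A' ≤ ch ∧ ch ≤ 'Z' then result ++ [Char.ofNat (ch.toNat - 'A'.toNat + 0x1D5A0)]
    else if 'a' ≤ ch ∧ ch ≤ 'z' then result ++ [Char.ofNat (ch.toNat - 'a'.toNat + 0x1D5BA)]
    else if '0' ≤ ch ∧ ch ≤ '9' then result ++ [Char.ofNat (ch.toNat - '0'.toNat + 0x1D7E2)]
    else result ++ [ch]) [])

-- ===== PORT B =====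
-- the translation table: three dict comprehensions merged (keys are disjoint code points)
def pvSansTable : PySem.Dict Int Char :=
  PySem.Dict.ofList (((PySem.List.pyRange 0 26 1).map (fun i => (((65 : Int) + i), Char.ofNat (0x1D5A0 + i.toNat))))
  ++ ((PySem.List.pyRange 0 26 1).map (fun i => (((97 : Int) + i), Char.ofNat (0x1D5BA + i.toNat))))
  ++ ((PySem.List.pyRange 0 10 1).map (fun i => (((48 : Int) + i), Char.ofNat (0x1D7E2 + i.toNat)))))

-- str.translate ported by hand (no PySem primitive): each character's code point is looked
-- up in the table, an absent key keeps the character — exact for a table whose values are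
-- single characters, which pvSansTable's are
def to_math_sans_plain_alt (text : String) : String :=
  String.mk (text.toList.map (fun c => (PySem.Dict.get? pvSansTable ((c.toNat : Int))).getD c))

-- ===== PRECONDITION & SPEC =====
def Spec_to_math_sans_plain (text : String) (out : String) : Prop := out = to_math_sans_plain_alt text
instance (text : String) (out : String) : Decidable (Spec_to_math_sans_plain text out) := by unfold Spec_to_math_sans_plain; infer_instance

-- ===== CLAIM (what is proved, stated in full; the proofs are below) =====
def Claim_equal_to_math_sans_plain : Prop := ∀ (text : String), Dom_to_math_sans_plain text → Spec_to_math_sans_plain text (to_math_sans_plain text)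

-- ===== LEMMAS AND PROOFS =====

-- A's per-character branch, factored out for the proof
def pvStepA (ch : Char) : Char :=
  if 'A' ≤ ch ∧ ch ≤ 'Z' then Char.ofNat (ch.toNat - 'A'.toNat + 0x1D5A0)
  else if 'a' ≤ ch ∧ ch ≤ 'z' then Char.ofNat (ch.toNat - 'a'.toNat + 0x1D5BA)
  else if '0' ≤ ch ∧ ch ≤ '9' then Char.ofNat (ch.toNat - '0'.toNat + 0x1D7E2)
  else ch

set_option maxRecDepth 4096 in
lemma pvStepA_eq_table_range128 :
    ∀ n ∈ List.range 128,
      pvStepA (Char.ofNat n) =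
        (PySem.Dict.get? pvSansTable (((Char.ofNat n).toNat : Int))).getD (Char.ofNat n) := by
  decide

lemma pvStepA_eq_table (c : Char) (hc : pvDomChar c = true) :
    pvStepA c = (PySem.Dict.get? pvSansTable ((c.toNat : Int))).getD c := by
  have h128 : c.toNat < 128 := by
    simp [pvDomChar] at hc
    omega
  have h := pvStepA_eq_table_range128 c.toNat (List.mem_range.mpr h128)
  rwa [Char.ofNat_toNat] at h

lemma pvFoldA_eq_map (l : List Char) :
    l.foldl (fun result ch =>
      if 'A' ≤ ch ∧ ch ≤ 'Z' then result ++ [Char.ofNat (ch.toNat - 'A'.toNat + 0x1D5A0)]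
      else if 'a' ≤ ch ∧ ch ≤ 'z' then result ++ [Char.ofNat (ch.toNat - 'a'.toNat + 0x1D5BA)]
      else if '0' ≤ ch ∧ ch ≤ '9' then result ++ [Char.ofNat (ch.toNat - '0'.toNat + 0x1D7E2)]
      else result ++ [ch]) [] = l.map pvStepA := by
  have hstep : (fun (result : List Char) (ch : Char) =>
      if 'A' ≤ ch ∧ ch ≤ 'Z' then result ++ [Char.ofNat (ch.toNat - 'A'.toNat + 0x1D5A0)]
      else if 'a' ≤ ch ∧ ch ≤ 'z' then result ++ [Char.ofNat (ch.toNat - 'a'.toNat + 0x1D5BA)]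
      else if '0' ≤ ch ∧ ch ≤ '9' then result ++ [Char.ofNat (ch.toNat - '0'.toNat + 0x1D7E2)]
      else result ++ [ch]) = (fun result ch => result ++ [pvStepA ch]) := by
    funext result ch
    simp only [pvStepA]
    split_ifs <;> rfl
  rw [hstep, PySem.List.foldl_append_singleton_eq_map]
  simp

-- ===== VERDICT (by name: the statement is the Claim_ definition above) =====
set_option maxRecDepth 8192 in
theorem to_math_sans_plain_spec : Claim_equal_to_math_sans_plain := by
  intro text hdom
  unfold Spec_to_math_sans_plain to_math_sans_plain to_math_sans_plain_alt
  rw [pvFoldA_eq_map]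
  congr 1
  apply List.map_congr_left
  intro c hc
  exact pvStepA_eq_table c (List.all_eq_true.mp hdom c hc)
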